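-- pv_equiv track=rewrite | github.com/Pablonopicasso/voynich-phts | code/03_grammar_coverage.py | matches_grammar
-- ===== SOURCE A (Python) =====
-- FRAME_GLYPHS    = {"q", "k", "t", "f", "sh", "p"}          # F: word-initial
--
-- CORE_GLYPHS     = {"o", "a", "e", "ch", "l", "r", "ee",
--                    "c", "ai", "ar", "ol", "or"}              # C: medial
--
-- SPECIFIER_GLYPHS = {"y", "n", "s", "m", "d", "dy", "edy"}   # S: word-final
--
-- def matches_grammar(tokens):
--     """
--     Check if a tokenized word matches W = F C* S*.
--     Returns (matches:bool, pattern:str, reason:str)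
--     """
--     if not tokens:
--         return False, "", "empty"
--
--     n = len(tokens)
--
--     # Single-token word: must be F or C (allow)
--     if n == 1:
--         t = tokens[0]
--         if t in FRAME_GLYPHS or t in CORE_GLYPHS or t in SPECIFIER_GLYPHS:
--             return True, "F", "single-token-word"
--         return False, "?", "unrecognized-single"
--
--     # Find the boundary between F, C, and S regions
--     # F: leading frame glyphs
--     # C*: middle core glyphs
--     # S*: trailing specifier glyphs
--
--     pattern_parts = []
--     pos = 0
--
--     # F segment (optional leading frame)
--     has_F = False
--     if tokens[0] in FRAME_GLYPHS:
--         has_F = True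
--         pattern_parts.append("F")
--         pos = 1
--
--     # C* segment
--     c_start = pos
--     while pos < n and tokens[pos] in CORE_GLYPHS:
--         pos += 1
--     if pos > c_start:
--         pattern_parts.append("C*")
--
--     # S* segment
--     s_start = pos
--     while pos < n and tokens[pos] in SPECIFIER_GLYPHS:
--         pos += 1
--     if pos > s_start:
--         pattern_parts.append("S*")
--
--     pattern = " ".join(pattern_parts) if pattern_parts else "?"
--
--     # Grammar match: all tokens consumed AND at least some recognized
--     if pos == n and len(pattern_parts) > 0:
--         return True, pattern, "grammar-match"
--     elif pos == n and len(pattern_parts) == 0: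
--         return False, "NONE", "no-recognized-tokens"
--     else:
--         # Unconsumed tokens
--         leftover = tokens[pos:]
--         return False, pattern + "+?", f"unconsumed: {leftover}"
-- ===== SOURCE B (Python) =====
-- FRAME_GLYPHS    = {"q", "k", "t", "f", "sh", "p"}
--
-- CORE_GLYPHS     = {"o", "a", "e", "ch", "l", "r", "ee",
--                    "c", "ai", "ar", "ol", "or"}
--
-- SPECIFIER_GLYPHS = {"y", "n", "s", "m", "d", "dy", "edy"}
--
--
-- def matches_grammar(tokens):
--     if not tokens:
--         return False, "", "empty"
--     if len(tokens) == 1: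
--         t = tokens[0]
--         if t in FRAME_GLYPHS or t in CORE_GLYPHS or t in SPECIFIER_GLYPHS:
--             return True, "F", "single-token-word"
--         return False, "?", "unrecognized-single"
--     # single left-to-right pass of a 3-state automaton for F? C* S*:
--     # state 0 = F still allowed, 1 = inside C*, 2 = inside S*;
--     # segment labels are emitted while consuming, deduplicated on the fly.
--     state = 0
--     labels = []
--     pos = 0
--     for t in tokens:
--         if state == 0 and t in FRAME_GLYPHS:
--             labels.append("F")
--             state = 1
--             pos += 1
--         elif state <= 1 and t in CORE_GLYPHS:
--             if not labels or labels[-1] != "C*":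
--                 labels.append("C*")
--             state = 1
--             pos += 1
--         elif t in SPECIFIER_GLYPHS:
--             if not labels or labels[-1] != "S*":
--                 labels.append("S*")
--             state = 2
--             pos += 1
--         else:
--             break
--     pattern = " ".join(labels) if labels else "?"
--     if pos == len(tokens):
--         if labels:
--             return True, pattern, "grammar-match"
--         return False, "NONE", "no-recognized-tokens"
--     return False, pattern + "+?", f"unconsumed: {tokens[pos:]}"
-- ===== Notes on version B (the rewrite author's own statement) =====
-- stated objective: alternative
-- what changed: A consumes the word in three staged index-based while-loops (leading F test, then a C* loop, then an S* loop) and appends segment labels after each stage; B runs one left-to-right pass of an explicit 3-state automaton for F?C*S*, emitting and deduplicating segment labels while consuming and breaking at the first token the current state rejects.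
import Mathlib
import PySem

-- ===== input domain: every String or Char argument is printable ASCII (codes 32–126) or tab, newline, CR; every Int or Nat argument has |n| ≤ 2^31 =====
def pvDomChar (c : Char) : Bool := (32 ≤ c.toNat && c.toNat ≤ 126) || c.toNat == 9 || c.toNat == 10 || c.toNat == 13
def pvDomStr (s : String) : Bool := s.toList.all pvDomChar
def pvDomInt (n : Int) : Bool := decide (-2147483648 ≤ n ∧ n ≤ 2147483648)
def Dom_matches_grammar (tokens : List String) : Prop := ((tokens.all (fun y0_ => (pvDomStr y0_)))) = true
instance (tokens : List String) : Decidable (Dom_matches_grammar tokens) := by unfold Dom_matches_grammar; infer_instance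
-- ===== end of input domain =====

-- B replaces A's three staged index-based while-loops by a single left-to-right pass of an
-- explicit 3-state automaton for F?C*S*; objective: alternative (same cost, different structure).

-- shared module constants (the Python sets)
def pvFrame : PySem.Set String := PySem.Set.ofList ["q", "k", "t", "f", "sh", "p"]
def pvCore : PySem.Set String := PySem.Set.ofList ["o", "a", "e", "ch", "l", "r", "ee", "c", "ai", "ar", "ol", "or"]
def pvSpec : PySem.Set String := PySem.Set.ofList ["y", "n", "s", "m", "d", "dy", "edy"]

-- Python repr of a str (exact for the printable-ASCII + tab/newline/CR domain)
def pvReprStr (s : String) : String :=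
  let cs := s.toList
  let q : Char := if cs.contains '\'' && !cs.contains '"' then '"' else '\''
  String.ofList (q :: cs.flatMap (fun c =>
    if c = '\\' then ['\\', '\\']
    else if c = q then ['\\', q]
    else if c = '\t' then ['\\', 't']
    else if c = '\n' then ['\\', 'n']
    else if c = '\r' then ['\\', 'r']
    else [c]) ++ [q])

-- Python str of a list of str, as in the f-string f"unconsumed: {leftover}"
def pvReprList (xs : List String) : String :=
  "[" ++ PySem.Str.join ", " (xs.map pvReprStr) ++ "]"

-- ===== PORT A =====
-- the two 'while pos < n and tokens[pos] in SET' loops of A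
def whileMem (p : String → Bool) (tokens : List String) (n : Nat) (pos : Nat) : Nat :=
  if h : pos < n ∧ p (tokens.getD pos "") then whileMem p tokens n (pos + 1) else pos
termination_by n - pos
decreasing_by omega

def matches_grammar (tokens : List String) : Bool × String × String :=
  if tokens.isEmpty then (false, "", "empty")
  else
    let n := tokens.length
    if n = 1 then
      let t := tokens.getD 0 ""
      if PySem.Set.contains pvFrame t || PySem.Set.contains pvCore t || PySem.Set.contains pvSpec t then
        (true, "F", "single-token-word")
      else (false, "?", "unrecognized-single")
    else
      let st := if PySem.Set.contains pvFrame (tokens.getD 0 "") then ((["F"] : List String), 1) else ([], 0)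
      let cstart := st.2
      let pos1 := whileMem (fun t => PySem.Set.contains pvCore t) tokens n st.2
      let parts1 := if cstart < pos1 then st.1 ++ ["C*"] else st.1
      let sstart := pos1
      let pos2 := whileMem (fun t => PySem.Set.contains pvSpec t) tokens n pos1
      let parts2 := if sstart < pos2 then parts1 ++ ["S*"] else parts1
      let pattern := if parts2.isEmpty then "?" else PySem.Str.join " " parts2
      if pos2 = n ∧ 0 < parts2.length then (true, pattern, "grammar-match")
      else if pos2 = n ∧ parts2.length = 0 then (false, "NONE", "no-recognized-tokens")
      else (false, pattern ++ "+?", "unconsumed: " ++ pvReprList (tokens.drop pos2))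

-- ===== PORT B =====
-- B's for-loop with break: one pass of the 3-state automaton, carrying (labels, pos)
def pvDfa : List String → Nat → List String → Nat → (List String × Nat)
  | [], _, labels, pos => (labels, pos)
  | t :: ts, state, labels, pos =>
    if state = 0 ∧ PySem.Set.contains pvFrame t then
      pvDfa ts 1 (labels ++ ["F"]) (pos + 1)
    else if state ≤ 1 ∧ PySem.Set.contains pvCore t then
      pvDfa ts 1 (if labels.getLast? ≠ some "C*" then labels ++ ["C*"] else labels) (pos + 1)
    else if PySem.Set.contains pvSpec t then
      pvDfa ts 2 (if labels.getLast? ≠ some "S*" then labels ++ ["S*"] else labels) (pos + 1)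
    else (labels, pos)

def matches_grammar_alt (tokens : List String) : Bool × String × String :=
  if tokens.isEmpty then (false, "", "empty")
  else if tokens.length = 1 then
    let t := tokens.getD 0 ""
    if PySem.Set.contains pvFrame t || PySem.Set.contains pvCore t || PySem.Set.contains pvSpec t then
      (true, "F", "single-token-word")
    else (false, "?", "unrecognized-single")
  else
    let r := pvDfa tokens 0 [] 0
    let labels := r.1
    let pos := r.2
    let pattern := if labels.isEmpty then "?" else PySem.Str.join " " labels
    if pos = tokens.length then
      if labels.isEmpty then (false, "NONE", "no-recognized-tokens")
      else (true, pattern, "grammar-match")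
    else (false, pattern ++ "+?", "unconsumed: " ++ pvReprList (tokens.drop pos))

-- ===== PRECONDITION & SPEC =====
def Spec_matches_grammar (tokens : List String) (out : Bool × String × String) : Prop := out = matches_grammar_alt tokens
instance (tokens : List String) (out : Bool × String × String) : Decidable (Spec_matches_grammar tokens out) := by unfold Spec_matches_grammar; infer_instance

-- ===== CLAIM (what is proved, stated in full; the proofs are below) =====
def Claim_equal_matches_grammar : Prop := ∀ (tokens : List String), Dom_matches_grammar tokens → Spec_matches_grammar tokens (matches_grammar tokens)

-- ===== LEMMAS AND PROOFS =====

lemma whileMem_eq (p : String → Bool) (tokens : List String) (pos : Nat) :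
    whileMem p tokens tokens.length pos = pos + ((tokens.drop pos).takeWhile p).length := by
  have H : ∀ k pos, tokens.length - pos ≤ k →
      whileMem p tokens tokens.length pos = pos + ((tokens.drop pos).takeWhile p).length := by
    intro k
    induction k with
    | zero =>
      intro pos hk
      have hge : tokens.length ≤ pos := by omega
      rw [whileMem, dif_neg (by rintro ⟨hlt, -⟩; omega), List.drop_eq_nil_of_le hge]
      simp
    | succ k ih =>
      intro pos hk
      by_cases h1 : pos < tokens.length
      · have hdrop : tokens.drop pos = tokens[pos] :: tokens.drop (pos + 1) :=
          List.drop_eq_getElem_cons h1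
        have hgetD : tokens.getD pos "" = tokens[pos] := List.getD_eq_getElem _ _ h1
        by_cases h2 : p tokens[pos] = true
        · rw [whileMem, dif_pos ⟨h1, by rw [hgetD]; exact h2⟩, ih (pos + 1) (by omega), hdrop,
            List.takeWhile_cons_of_pos h2, List.length_cons]
          omega
        · rw [whileMem, dif_neg (by rintro ⟨-, hp⟩; rw [hgetD] at hp; exact h2 hp), hdrop,
            List.takeWhile_cons_of_neg (by simpa using h2), List.length_nil]
          omega
      · rw [whileMem, dif_neg (by rintro ⟨hlt, -⟩; exact h1 hlt),
          List.drop_eq_nil_of_le (by omega)]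
        simp
  exact H (tokens.length - pos) pos le_rfl

lemma pvDfa_state2 : ∀ (ts : List String) (labels : List String) (pos : Nat),
    labels.getLast? = some "S*" →
    pvDfa ts 2 labels pos = (labels, pos + (ts.takeWhile pvSpec.contains).length) := by
  intro ts
  induction ts with
  | nil => intro labels pos h; simp [pvDfa]
  | cons t ts ih =>
    intro labels pos h
    by_cases hs : PySem.Set.contains pvSpec t
    · rw [pvDfa, if_neg (by simp), if_neg (by simp), if_pos hs, if_neg (by simp [h]),
        ih labels (pos + 1) h, List.takeWhile_cons_of_pos hs, List.length_cons]
      simp only [Prod.mk.injEq]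
      exact ⟨trivial, by omega⟩
    · rw [pvDfa, if_neg (by simp), if_neg (by simp), if_neg hs]
      simp [List.takeWhile_cons]
      simpa using hs

lemma pvDfa_state1 : ∀ (ts : List String) (labels : List String) (pos : Nat),
    labels.getLast? ≠ some "S*" →
    pvDfa ts 1 labels pos =
      ((labels ++
          (if 0 < (ts.takeWhile pvCore.contains).length ∧ labels.getLast? ≠ some "C*" then
            ["C*"] else [])) ++
          (if 0 < ((ts.drop (ts.takeWhile pvCore.contains).length).takeWhile pvSpec.contains).length
            then ["S*"] else []),
       pos + (ts.takeWhile pvCore.contains).length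
           + ((ts.drop (ts.takeWhile pvCore.contains).length).takeWhile pvSpec.contains).length) := by
  intro ts
  induction ts with
  | nil => intro labels pos h; simp [pvDfa]
  | cons t ts ih =>
    intro labels pos h
    by_cases hc : PySem.Set.contains pvCore t
    · have hlab : (if labels.getLast? ≠ some "C*" then labels ++ ["C*"] else labels).getLast?
          = some "C*" := by
        split_ifs with hl
        · simp
        · simpa using hl
      rw [pvDfa, if_neg (by simp), if_pos ⟨by omega, hc⟩,
        ih _ (pos + 1) (by rw [hlab]; simp),
        List.takeWhile_cons_of_pos hc, List.length_cons, hlab]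
      simp only [List.drop_succ_cons, Prod.mk.injEq]
      refine ⟨?_, by omega⟩
      split_ifs <;> simp_all
    · have hcore0 : List.takeWhile pvCore.contains (t :: ts) = [] := by
        simp [List.takeWhile_cons]
        simpa using hc
      rw [hcore0]
      by_cases hs : PySem.Set.contains pvSpec t
      · rw [pvDfa, if_neg (by simp), if_neg (by rintro ⟨-, h'⟩; exact hc h'),
          if_pos hs, if_pos h, pvDfa_state2 ts _ (pos + 1) (by simp)]
        simp only [List.length_nil, List.drop_zero, List.takeWhile_cons_of_pos hs,
          List.length_cons, Prod.mk.injEq]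
        refine ⟨by simp, by omega⟩
      · rw [pvDfa, if_neg (by simp), if_neg (by rintro ⟨-, h'⟩; exact hc h'), if_neg hs]
        simp [List.takeWhile_cons]
        simpa using hs

-- ===== VERDICT (by name: the statement is the Claim_ definition above) =====
set_option maxRecDepth 4096 in
set_option maxHeartbeats 4000000 in
theorem matches_grammar_spec : Claim_equal_matches_grammar := by
  intro tokens hdom
  clear hdom
  unfold Spec_matches_grammar
  match tokens with
  | [] => rfl
  | [t0] => rfl
  | t0 :: t1 :: rest =>
    have hwC' : ∀ pos : Nat, whileMem (fun t => decide (t ∈ pvCore)) (t0 :: t1 :: rest)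
        (rest.length + 1 + 1) pos
        = pos + (List.takeWhile (fun t => decide (t ∈ pvCore))
            (List.drop pos (t0 :: t1 :: rest))).length := by
      intro pos
      simpa using whileMem_eq (fun t => PySem.Set.contains pvCore t) (t0 :: t1 :: rest) pos
    have hwS' : ∀ pos : Nat, whileMem (fun t => decide (t ∈ pvSpec)) (t0 :: t1 :: rest)
        (rest.length + 1 + 1) pos
        = pos + (List.takeWhile (fun t => decide (t ∈ pvSpec))
            (List.drop pos (t0 :: t1 :: rest))).length := by
      intro pos
      simpa using whileMem_eq (fun t => PySem.Set.contains pvSpec t) (t0 :: t1 :: rest) pos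
    have hcontC : (fun t : String => decide (t ∈ pvCore)) = pvCore.contains := by
      funext t; by_cases h : t ∈ pvCore <;> simp [h]
    have hcontS : (fun t : String => decide (t ∈ pvSpec)) = pvSpec.contains := by
      funext t; by_cases h : t ∈ pvSpec <;> simp [h]
    by_cases hF : PySem.Set.contains pvFrame t0
    · have hB : pvDfa (t0 :: t1 :: rest) 0 [] 0 = pvDfa (t1 :: rest) 1 ["F"] 1 := by
        rw [pvDfa, if_pos ⟨rfl, hF⟩]; rfl
      rw [matches_grammar, matches_grammar_alt]
      simp only [List.isEmpty_cons, Bool.false_eq_true, if_false]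
      rw [hB, pvDfa_state1 _ _ _ (by simp)]
      have hFm : t0 ∈ pvFrame := by simpa using hF
      simp [hFm]
      simp only [hwC', hwS', List.drop_succ_cons, List.drop_zero]
      simp only [hcontC, hcontS]
      generalize hcg : (List.takeWhile pvCore.contains (t1 :: rest)).length = c
      rw [show List.drop (1 + c) (t0 :: t1 :: rest) = List.drop c (t1 :: rest) by
        rw [Nat.add_comm 1 c, List.drop_succ_cons]]
      generalize hsg : (List.takeWhile pvSpec.contains (List.drop c (t1 :: rest))).length = s
      split_ifs <;> first | rfl | omega | (simp_all <;> omega) | simp_all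
    · have hFm : t0 ∉ pvFrame := by simpa using hF
      by_cases hC : PySem.Set.contains pvCore t0
      · have hCm : t0 ∈ pvCore := by simpa using hC
        have hB : pvDfa (t0 :: t1 :: rest) 0 [] 0 = pvDfa (t1 :: rest) 1 ["C*"] 1 := by
          rw [pvDfa, if_neg (by simp [hFm]), if_pos ⟨by omega, hC⟩]; rfl
        rw [matches_grammar, matches_grammar_alt]
        simp only [List.isEmpty_cons, Bool.false_eq_true, if_false]
        rw [hB, pvDfa_state1 _ _ _ (by simp)]
        simp [hFm]
        simp only [hwC', hwS', List.drop_succ_cons, List.drop_zero]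
        simp only [hcontC, hcontS]
        simp only [List.takeWhile_cons_of_pos (p := pvCore.contains) hC, List.length_cons,
          Nat.zero_add, List.drop_succ_cons]
        generalize hcg : (List.takeWhile pvCore.contains (t1 :: rest)).length = c
        generalize hsg : (List.takeWhile pvSpec.contains (List.drop c (t1 :: rest))).length = s
        simp only [show (1 : Nat) + c = c + 1 from Nat.add_comm 1 c]
        split_ifs <;> first | rfl | omega | (simp_all <;> omega) | simp_all
      · have hCm : t0 ∉ pvCore := by simpa using hC
        have h0C : List.takeWhile pvCore.contains (t0 :: t1 :: rest) = [] :=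
          List.takeWhile_cons_of_neg (p := pvCore.contains) hC
        by_cases hS : PySem.Set.contains pvSpec t0
        · have hSm : t0 ∈ pvSpec := by simpa using hS
          have hB : pvDfa (t0 :: t1 :: rest) 0 [] 0 = pvDfa (t1 :: rest) 2 ["S*"] 1 := by
            rw [pvDfa, if_neg (by simp [hFm]), if_neg (by simp [hCm]), if_pos hS]; rfl
          rw [matches_grammar, matches_grammar_alt]
          simp only [List.isEmpty_cons, Bool.false_eq_true, if_false]
          rw [hB, pvDfa_state2 _ _ _ (by simp)]
          simp [hFm]
          simp only [hwC', hwS', List.drop_succ_cons, List.drop_zero]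
          simp only [hcontC, hcontS]
          simp only [h0C, List.length_nil, Nat.zero_add, List.drop_zero,
            List.takeWhile_cons_of_pos (p := pvSpec.contains) hS, List.length_cons,
            List.drop_succ_cons]
          generalize hsg : (List.takeWhile pvSpec.contains (t1 :: rest)).length = s
          simp only [show (1 : Nat) + s = s + 1 from Nat.add_comm 1 s, List.drop_succ_cons]
          split_ifs <;> first | rfl | omega | (simp_all <;> omega) | simp_all
        · have hSm : t0 ∉ pvSpec := by simpa using hS
          have h0S : List.takeWhile pvSpec.contains (t0 :: t1 :: rest) = [] :=
            List.takeWhile_cons_of_neg (p := pvSpec.contains) hS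
          have hB : pvDfa (t0 :: t1 :: rest) 0 [] 0 = (([] : List String), 0) := by
            rw [pvDfa, if_neg (by simp [hFm]), if_neg (by simp [hCm]), if_neg hS]
          rw [matches_grammar, matches_grammar_alt]
          simp only [List.isEmpty_cons, Bool.false_eq_true, if_false]
          rw [hB]
          simp [hFm]
          simp only [hwC', hwS']
          simp only [hcontC, hcontS]
          simp only [h0C, h0S, List.length_nil, Nat.zero_add, Nat.add_zero, List.drop_zero]
          split_ifs <;> first | rfl | omega | (simp_all <;> omega) | simp_all
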